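-- pv_equiv track=rewrite | github.com/shyamk01/hackerrank | Non-Divisible Subset.py | checknotdivisible
-- ===== SOURCE A (Python) =====
-- from itertools import combinations
--
-- k1=7
--
-- def checknotdivisible(rt):
--     ks=list(combinations(rt,2))
--     flag=False
--     for x in ks:
--         if sum(x)%k1==0:
--             flag=True
--
--     if flag==False:
--         return rt
-- ===== SOURCE B (Python) =====
-- def checknotdivisible(rt):
--     seen = set()
--     bad = False
--     for v in rt:
--         if (-v) % 7 in seen:
--             bad = True
--         seen.add(v % 7)
--     if not bad:
--         return rt
-- ===== Notes on version B (the rewrite author's own statement) =====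
-- stated objective: faster
-- what changed: Replaced the O(n^2) scan over all 2-combinations with a single pass that keeps the set of residues mod 7 seen so far and checks whether the complementary residue was already seen.
import Mathlib
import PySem

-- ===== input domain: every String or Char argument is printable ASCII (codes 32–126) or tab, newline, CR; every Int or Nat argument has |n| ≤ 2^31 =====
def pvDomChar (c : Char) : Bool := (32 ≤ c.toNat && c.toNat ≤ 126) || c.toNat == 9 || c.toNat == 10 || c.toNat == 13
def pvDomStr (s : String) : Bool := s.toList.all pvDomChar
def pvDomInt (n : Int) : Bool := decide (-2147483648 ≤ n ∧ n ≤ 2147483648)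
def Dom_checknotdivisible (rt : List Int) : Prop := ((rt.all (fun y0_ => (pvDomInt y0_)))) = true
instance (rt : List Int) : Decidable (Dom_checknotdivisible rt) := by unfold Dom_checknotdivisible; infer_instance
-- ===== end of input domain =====

-- B replaces A's scan over all 2-combinations by a single pass over the list keeping
-- the set of residues mod 7 seen so far (objective: faster, asymptotic O(n^2) → O(n)).

-- ===== PORT A =====
-- list(combinations(rt, 2))
def pvCombos2 : List Int → List (Int × Int)
  | [] => []
  | x :: xs => xs.map (fun y => (x, y)) ++ pvCombos2 xs

def checknotdivisible (rt : List Int) : Option (List Int) :=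
  let ks := pvCombos2 rt
  let flag := ks.foldl
    (fun flag x => if PySem.Int.mod (x.1 + x.2) 7 == 0 then true else flag) false
  if flag == false then some rt else none

-- ===== PORT B =====
def checknotdivisible_alt (rt : List Int) : Option (List Int) :=
  let st := rt.foldl
    (fun (p : PySem.Set Int × Bool) v =>
      (PySem.Set.add p.1 (PySem.Int.mod v 7),
       if PySem.Set.contains p.1 (PySem.Int.mod (-v) 7) then true else p.2))
    (PySem.Set.empty, false)
  if !st.2 then some rt else none

-- ===== PRECONDITION & SPEC =====
def Spec_checknotdivisible (rt : List Int) (out : Option (List Int)) : Prop := out = checknotdivisible_alt rt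
instance (rt : List Int) (out : Option (List Int)) : Decidable (Spec_checknotdivisible rt out) := by unfold Spec_checknotdivisible; infer_instance

-- ===== CLAIM (what is proved, stated in full; the proofs are below) =====
def Claim_equal_checknotdivisible : Prop := ∀ (rt : List Int), Dom_checknotdivisible rt → Spec_checknotdivisible rt (checknotdivisible rt)

-- ===== LEMMAS AND PROOFS =====

-- A's flag loop is an 'any' over the pair list
theorem foldA_eq_any (ks : List (Int × Int)) (b : Bool) :
    ks.foldl (fun flag x => if PySem.Int.mod (x.1 + x.2) 7 == 0 then true else flag) b
      = (b || ks.any (fun x => PySem.Int.mod (x.1 + x.2) 7 == 0)) := by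
  induction ks generalizing b with
  | nil => simp
  | cons x xs ih =>
    rw [List.foldl_cons, List.any_cons]
    by_cases h : (PySem.Int.mod (x.1 + x.2) 7 == 0) = true
    · rw [if_pos h, ih, h]; simp
    · rw [Bool.not_eq_true] at h
      rw [if_neg (by rw [h]; exact Bool.false_ne_true), ih, h, Bool.false_or]

-- residue arithmetic: "(-y) % 7 == x % 7" is "(x + y) % 7 == 0"
theorem comp_eq_iff (x y : Int) :
    (PySem.Int.mod (-y) 7 == PySem.Int.mod x 7) = (PySem.Int.mod (x + y) 7 == 0) := by
  have h7 : (0:Int) < 7 := by norm_num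
  simp only [PySem.Int.mod_eq_emod_of_pos h7]
  rw [Bool.eq_iff_iff, beq_iff_eq, beq_iff_eq]
  omega

theorem any_or (xs : List Int) (p q : Int → Bool) :
    xs.any (fun y => p y || q y) = (xs.any p || xs.any q) := by
  induction xs with
  | nil => simp
  | cons x xs ih =>
    simp only [List.any_cons, ih]
    by_cases hp : p x <;> by_cases hq : q x <;> simp [hp, hq]

-- B's scan: bad-flag after the fold, as 'any' over the list plus 'any' over the pairs
theorem foldB_snd (xs : List Int) (s : PySem.Set Int) (b : Bool) :
    (xs.foldl
      (fun (p : PySem.Set Int × Bool) v =>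
        (PySem.Set.add p.1 (PySem.Int.mod v 7),
         if PySem.Set.contains p.1 (PySem.Int.mod (-v) 7) then true else p.2))
      (s, b)).2
    = (b || xs.any (fun y => PySem.Set.contains s (PySem.Int.mod (-y) 7))
         || (pvCombos2 xs).any (fun x => PySem.Int.mod (x.1 + x.2) 7 == 0)) := by
  induction xs generalizing s b with
  | nil => simp [pvCombos2]
  | cons x xs ih =>
    simp only [List.foldl_cons, ih, pvCombos2, List.any_append, List.any_map, List.any_cons]
    have hmem : ∀ y : Int,
        PySem.Set.contains (PySem.Set.add s (PySem.Int.mod x 7)) (PySem.Int.mod (-y) 7)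
          = (PySem.Set.contains s (PySem.Int.mod (-y) 7)
             || (PySem.Int.mod (x + y) 7 == 0)) := by
      intro y
      rw [← comp_eq_iff x y]
      simp [PySem.Set.contains, PySem.Set.mem_add]
      tauto
    have : xs.any (fun y => PySem.Set.contains (PySem.Set.add s (PySem.Int.mod x 7)) (PySem.Int.mod (-y) 7))
        = (xs.any (fun y => PySem.Set.contains s (PySem.Int.mod (-y) 7))
           || xs.any (fun y => PySem.Int.mod (x + y) 7 == 0)) := by
      simp only [hmem, any_or]
    rw [this]
    simp [Function.comp_def, Bool.or_comm, Bool.or_left_comm, Bool.or_assoc]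

-- ===== VERDICT (by name: the statement is the Claim_ definition above) =====
theorem checknotdivisible_spec : Claim_equal_checknotdivisible := by
  intro rt _
  simp only [Spec_checknotdivisible, checknotdivisible, checknotdivisible_alt,
    foldA_eq_any, foldB_snd, Bool.false_or]
  have hnone : (rt.any fun y => PySem.Set.contains PySem.Set.empty (PySem.Int.mod (-y) 7)) = false := by
    simp [PySem.Set.empty, PySem.Set.contains]
  rw [hnone, Bool.false_or]
  cases hc : (pvCombos2 rt).any (fun x => PySem.Int.mod (x.1 + x.2) 7 == 0) <;> simp
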